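-- pv_equiv track=rewrite | github.com/sanusiamir/masukbisa | app.py | gen_vanilla
-- ===== SOURCE A (Python) =====
-- from collections import Counter, defaultdict
--
-- def _pick_most_common(counter: Counter) -> str:
--     return sorted(counter.items(), key=lambda x: (-x[1], x[0]))[0][0]
--
-- def gen_vanilla(seed: str, n: int, fwd_big) -> str:
--     tokens = seed.split() or ["kata"]
--     cur = tokens[-1]
--     out = []
--     for _ in range(n):
--         cand = fwd_big.get(cur)
--         nxt = _pick_most_common(cand) if cand else f"{cur}_next"
--         out.append(nxt); cur = nxt
--     return " ".join(out)
-- ===== SOURCE B (Python) =====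
-- def _best(items):
--     # linear argmin scan under the tie-break key (-count, token)
--     best = None
--     for tok, cnt in items:
--         if best is None or (-cnt, tok) < (-best[1], best[0]):
--             best = (tok, cnt)
--     return best[0]
--
-- def gen_vanilla(seed: str, n: int, fwd_big) -> str:
--     table = {k: _best(v.items()) for k, v in fwd_big.items() if v}
--     words = seed.split()
--     cur = words[-1] if words else "kata"
--     pieces = []
--     while n > 0:
--         cur = table[cur] if cur in table else cur + "_next"
--         pieces.append(cur)
--         n -= 1
--     return " ".join(pieces)
-- ===== Notes on version B (the rewrite author's own statement) =====
-- stated objective: alternative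
-- what changed: B precomputes each token's best successor once per key by a single linear argmin scan (no sorting at all) into a table, then generates the n tokens by pure table chaining in a count-down loop, instead of re-sorting the current token's full counter at every generation step.
import Mathlib
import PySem

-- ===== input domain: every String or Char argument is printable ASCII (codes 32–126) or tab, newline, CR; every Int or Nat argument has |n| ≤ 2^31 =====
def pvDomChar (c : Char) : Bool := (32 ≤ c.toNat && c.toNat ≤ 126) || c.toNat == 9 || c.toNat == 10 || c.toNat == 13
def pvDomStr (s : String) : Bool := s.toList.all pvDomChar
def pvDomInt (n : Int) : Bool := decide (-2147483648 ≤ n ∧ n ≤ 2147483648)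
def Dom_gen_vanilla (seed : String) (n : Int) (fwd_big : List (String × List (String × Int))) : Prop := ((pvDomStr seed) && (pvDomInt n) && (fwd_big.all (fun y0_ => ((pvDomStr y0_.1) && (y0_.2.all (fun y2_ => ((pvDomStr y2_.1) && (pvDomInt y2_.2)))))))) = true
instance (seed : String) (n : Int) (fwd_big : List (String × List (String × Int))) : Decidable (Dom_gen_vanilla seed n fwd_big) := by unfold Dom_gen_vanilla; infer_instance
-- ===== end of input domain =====

-- B precomputes each token's best successor once per key by a linear argmin scan (no sorting) into a
-- table, then generates the n tokens by pure table chaining in a count-down loop (alternative decomposition).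


-- ===== PORT A =====
-- sorted(counter.items(), key=lambda x: (-x[1], x[0]))[0][0]   (A only calls this under 'if cand', i.e. nonempty)
def pvPickMostCommon (c : List (String × Int)) : String :=
  (PySem.List.pyGetD (PySem.List.sorted2 c (fun x => -x.2) (fun x => x.1)) 0 ("", 0)).1

def gen_vanilla (seed : String) (n : Int) (fwd_big : List (String × List (String × Int))) : String :=
  let tokens := if PySem.Str.split₀ seed = [] then ["kata"] else PySem.Str.split₀ seed
  let cur := PySem.List.pyGetD tokens (-1) ""
  let st := (PySem.List.pyRange 0 n 1).foldl
    (fun (s : String × List String) _ =>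
      let cand := (PySem.Dict.mk fwd_big).get? s.1
      let nxt := match cand with
        | some c => if c ≠ [] then pvPickMostCommon c else s.1 ++ "_next"
        | none => s.1 ++ "_next"
      (nxt, s.2 ++ [nxt]))
    (cur, [])
  PySem.Str.join " " st.2

-- ===== PORT B =====
-- _best: linear scan keeping the running argmin under the tuple key (-count, token); B only calls it on nonempty v
def pvBestScan (items : List (String × Int)) : String :=
  ((items.foldl (fun best x =>
      match best with
      | none => some x
      | some b => if -x.2 < -b.2 ∨ (-x.2 = -b.2 ∧ x.1 < b.1) then some x else some b)
    none).getD ("", 0)).1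

-- {k: _best(v.items()) for k, v in fwd_big.items() if v}
def pvTableB (fwd_big : List (String × List (String × Int))) : PySem.Dict String String :=
  fwd_big.foldl (fun d kv => if kv.2 ≠ [] then d.insert kv.1 (pvBestScan kv.2) else d) PySem.Dict.empty

-- while n > 0: cur = table[cur] if cur in table else cur + "_next"; pieces.append(cur); n -= 1
def pvGenLoop (table : PySem.Dict String String) : Nat → String → List String → List String
  | 0, _, pieces => pieces
  | Nat.succ k, cur, pieces =>
      let nxt := if table.contains cur then table.getD cur "" else cur ++ "_next"
      pvGenLoop table k nxt (pieces ++ [nxt])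

def gen_vanilla_alt (seed : String) (n : Int) (fwd_big : List (String × List (String × Int))) : String :=
  let table := pvTableB fwd_big
  let words := PySem.Str.split₀ seed
  let cur := match words.getLast? with | some w => w | none => "kata"
  PySem.Str.join " " (pvGenLoop table n.toNat cur [])

-- ===== PRECONDITION & SPEC =====
-- Pre_ excludes association lists with duplicate keys: they correspond to no Python dict (a dict cannot
-- hold two equal keys), and A's first-match lookup vs B's last-overwrite table order there is accidental.
def Pre_gen_vanilla (seed : String) (n : Int) (fwd_big : List (String × List (String × Int))) : Prop :=
  (fwd_big.map Prod.fst).Nodup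
instance (seed : String) (n : Int) (fwd_big : List (String × List (String × Int))) : Decidable (Pre_gen_vanilla seed n fwd_big) := by unfold Pre_gen_vanilla; infer_instance

def pvWitness_gen_vanilla : String × Int × (List (String × List (String × Int))) :=
  ("a b", 3, [("b", [("c", 2), ("d", 2)]), ("c", [])])

def Spec_gen_vanilla (seed : String) (n : Int) (fwd_big : List (String × List (String × Int))) (out : String) : Prop := out = gen_vanilla_alt seed n fwd_big
instance (seed : String) (n : Int) (fwd_big : List (String × List (String × Int))) (out : String) : Decidable (Spec_gen_vanilla seed n fwd_big out) := by unfold Spec_gen_vanilla; infer_instance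

-- ===== CLAIM (what is proved, stated in full; the proofs are below) =====
def Claim_equal_gen_vanilla : Prop := ∀ (seed : String) (n : Int) (fwd_big : List (String × List (String × Int))), Dom_gen_vanilla seed n fwd_big → Pre_gen_vanilla seed n fwd_big → Spec_gen_vanilla seed n fwd_big (gen_vanilla seed n fwd_big)

-- ===== LEMMAS AND PROOFS =====

-- Python's tuple tie-break (-count, token) as the strict 'before' test sorted2 uses
def pvLt (a b : String × Int) : Bool :=
  decide (-a.2 < -b.2) || (!decide (-b.2 < -a.2) && decide (a.1 < b.1))

theorem pvLt_iff (a b : String × Int) :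
    pvLt a b = true ↔ (-a.2 < -b.2 ∨ (-a.2 = -b.2 ∧ a.1 < b.1)) := by
  unfold pvLt
  by_cases h1 : (-a.2 < -b.2) <;> by_cases h3 : a.1 < b.1 <;>
    simp [h1, h3] <;> omega

-- B's running-min body equals the pvLt form of the same body
theorem bfun_eq :
    (fun (best : Option (String × Int)) (x : String × Int) =>
      match best with
      | none => some x
      | some b => if -x.2 < -b.2 ∨ (-x.2 = -b.2 ∧ x.1 < b.1) then some x else some b)
    = (fun acc x =>
      match acc with
      | none => some x
      | some m => if pvLt x m then some x else some m) := by
  funext best x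
  cases best with
  | none => rfl
  | some b => exact if_congr (Iff.symm (pvLt_iff x b)) rfl rfl

-- head of insertBy: x goes in front iff 'before x head'
theorem head?_insertBy {α : Type} (before : α → α → Bool) (x : α) (ys : List α) :
    (PySem.List.insertBy before x ys).head? =
      some (match ys with
            | [] => x
            | y :: _ => if before x y then x else y) := by
  cases ys with
  | nil => rfl
  | cons y t => simp only [PySem.List.insertBy]; split_ifs <;> rfl

-- the option-valued running-min fold started at 'some p' is the plain running-min fold
theorem foldl_min_run {α : Type} (c : α → α → Bool) (t : List α) (p : α) :
    (t.foldl (fun acc x =>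
        match acc with
        | none => some x
        | some m => if c x m then some x else some m) (some p)) =
      some (t.foldl (fun m x => if c x m then x else m) p) := by
  induction t generalizing p with
  | nil => rfl
  | cons x t ih =>
      simp only [List.foldl_cons]
      cases h : c x p <;> simp only [h, if_true, if_false, Bool.false_eq_true] <;> exact ih _

-- the head of the insertion-sort fold evolves exactly like the running-min fold
theorem head?_foldl_insertBy {α : Type} (before : α → α → Bool) (xs : List α) (init : List α) :
    (xs.foldl (fun acc x => PySem.List.insertBy before x acc) init).head? =
      xs.foldl (fun acc x =>
          match acc with
          | none => some x
          | some m => if before x m then some x else some m) init.head? := by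
  induction xs generalizing init with
  | nil => rfl
  | cons x t ih =>
      simp only [List.foldl_cons]
      rw [ih, head?_insertBy]
      cases init with
      | nil => rfl
      | cons y ys =>
          simp only [List.head?_cons]
          cases h : before x y <;> simp only [h, if_true, if_false, Bool.false_eq_true]

-- first element of A's stable sort = B's linear argmin scan (same tie-break key)
theorem pick_eq_best (c : List (String × Int)) (hc : c ≠ []) :
    pvPickMostCommon c = pvBestScan c := by
  match c with
  | p :: t =>
    have hsort : PySem.List.sorted2 (p :: t) (fun x => -x.2) (fun x => x.1) =
        (p :: t).foldl (fun acc x => PySem.List.insertBy pvLt x acc) [] := rfl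
    have hh : ((p :: t).foldl (fun acc x => PySem.List.insertBy pvLt x acc) []).head? =
        some (t.foldl (fun m x => if pvLt x m then x else m) p) := by
      rw [head?_foldl_insertBy]
      simp only [List.head?_nil, List.foldl_cons]
      convert foldl_min_run pvLt t p using 2
    have hscan : ((p :: t).foldl (fun best x =>
          match best with
          | none => some x
          | some b => if -x.2 < -b.2 ∨ (-x.2 = -b.2 ∧ x.1 < b.1) then some x else some b)
        none) = some (t.foldl (fun m x => if pvLt x m then x else m) p) := by
      rw [bfun_eq]
      simp only [List.foldl_cons]
      convert foldl_min_run pvLt t p using 2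
      funext acc x
      cases acc <;> rfl
    unfold pvPickMostCommon pvBestScan
    rw [hsort, hscan]
    cases hs : (p :: t).foldl (fun acc x => PySem.List.insertBy pvLt x acc) [] with
    | nil => rw [hs] at hh; simp at hh
    | cons q r =>
        rw [hs] at hh
        simp only [List.head?_cons, Option.some.injEq] at hh
        simp [PySem.List.pyGetD, PySem.List.pyGet?, PySem.List.pyIdx?, hh]

-- lookups in B's table, for an association list with distinct keys
theorem table_get (l : List (String × List (String × Int))) (d : PySem.Dict String String)
    (k : String) (hnd : (l.map Prod.fst).Nodup) :
    (l.foldl (fun d kv => if kv.2 ≠ [] then d.insert kv.1 (pvBestScan kv.2) else d) d).get? k =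
      match (PySem.Dict.mk l).get? k with
      | some c => if c = [] then d.get? k else some (pvBestScan c)
      | none => d.get? k := by
  induction l generalizing d with
  | nil => simp [PySem.Dict.get?]
  | cons kv rest ih =>
      simp only [List.map_cons, List.nodup_cons, List.mem_map] at hnd
      obtain ⟨hk_not, hnd'⟩ := hnd
      simp only [List.foldl_cons]
      rw [PySem.Dict.get?_mk_cons]
      by_cases hkk : kv.1 = k
      · subst hkk
        have hnone : (PySem.Dict.mk rest).get? kv.1 = none := by
          rw [PySem.Dict.get?_eq_none_iff_not_mem_keys]
          intro hmem
          have : kv.1 ∈ rest.map Prod.fst := by simpa [PySem.Dict.keys] using hmem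
          obtain ⟨x, hx, hx1⟩ := List.mem_map.mp this
          exact hk_not ⟨x, hx, hx1⟩
        by_cases hv : kv.2 = []
        · simp only [hv, ne_eq, not_true_eq_false, if_false, ite_false]
          rw [ih d hnd', hnone]
          simp
        · simp only [ne_eq, hv, not_false_eq_true, if_true, ite_true]
          rw [ih _ hnd', hnone]
          simp [PySem.Dict.get?_insert_self, hv]
      · have hne : k ≠ kv.1 := fun h => hkk h.symm
        have hbeq : (kv.1 == k) = false := by simp [hkk]
        rw [hbeq]
        simp only [Bool.false_eq_true, if_false]
        by_cases hv : kv.2 = []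
        · simp only [hv, ne_eq, not_true_eq_false, if_false, ite_false]
          exact ih d hnd'
        · simp only [ne_eq, hv, not_false_eq_true, if_true, ite_true]
          rw [ih _ hnd']
          cases hr : (PySem.Dict.mk rest).get? k with
          | none => simp [PySem.Dict.get?_insert_of_ne _ _ hne]
          | some c => simp [PySem.Dict.get?_insert_of_ne _ _ hne]

-- one generation step of B = one generation step of A (distinct keys)
theorem step_eq (f : List (String × List (String × Int))) (hnd : (f.map Prod.fst).Nodup)
    (cur : String) :
    (if (pvTableB f).contains cur then (pvTableB f).getD cur "" else cur ++ "_next") =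
      (match (PySem.Dict.mk f).get? cur with
       | some c => if c ≠ [] then pvPickMostCommon c else cur ++ "_next"
       | none => cur ++ "_next") := by
  rw [PySem.Dict.contains_eq_isSome_get?, PySem.Dict.getD_eq_get?_getD]
  unfold pvTableB
  rw [table_get f PySem.Dict.empty cur hnd]
  cases hc : (PySem.Dict.mk f).get? cur with
  | none => simp [PySem.Dict.get?_empty]
  | some c =>
      by_cases hv : c = []
      · simp [hv, PySem.Dict.get?_empty]
      · simp [hv, pick_eq_best c hv]

-- A's generation fold (the loop counter is ignored) produces B's chained list
theorem loop_eq (f : List (String × List (String × Int))) (hnd : (f.map Prod.fst).Nodup)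
    (l : List Int) (cur : String) (acc : List String) :
    (l.foldl (fun (s : String × List String) _ =>
        let cand := (PySem.Dict.mk f).get? s.1
        let nxt := match cand with
          | some c => if c ≠ [] then pvPickMostCommon c else s.1 ++ "_next"
          | none => s.1 ++ "_next"
        (nxt, s.2 ++ [nxt])) (cur, acc)).2 =
      pvGenLoop (pvTableB f) l.length cur acc := by
  induction l generalizing cur acc with
  | nil => rfl
  | cons x t ih =>
      simp only [List.foldl_cons, List.length_cons]
      rw [show pvGenLoop (pvTableB f) (t.length + 1) cur acc =
          pvGenLoop (pvTableB f) t.length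
            (if (pvTableB f).contains cur then (pvTableB f).getD cur "" else cur ++ "_next")
            (acc ++ [if (pvTableB f).contains cur then (pvTableB f).getD cur "" else cur ++ "_next"])
        from rfl]
      rw [step_eq f hnd cur]
      exact ih _ _

-- ===== VERDICT (by name: the statement is the Claim_ definition above) =====
theorem gen_vanilla_spec : Claim_equal_gen_vanilla := by
  intro seed n fwd_big _hdom hpre
  unfold Spec_gen_vanilla gen_vanilla gen_vanilla_alt
  have hcur : PySem.List.pyGetD
      (if PySem.Str.split₀ seed = [] then ["kata"] else PySem.Str.split₀ seed) (-1) "" =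
      (match (PySem.Str.split₀ seed).getLast? with | some w => w | none => "kata") := by
    cases hws : PySem.Str.split₀ seed with
    | nil => rfl
    | cons w ws =>
        simp only [if_neg (List.cons_ne_nil w ws)]
        rw [PySem.List.pyGetD_neg_ofNat (w :: ws) 1 "" (by omega) (by simp),
          List.getLast?_eq_some_getLast (List.cons_ne_nil w ws)]
        simp [List.getLast_eq_getElem]
  simp only [hcur]
  apply congrArg (PySem.Str.join " ")
  rw [loop_eq fwd_big hpre, PySem.List.length_pyRange_one]
  norm_num
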